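-- pv_equiv track=rewrite | github.com/Hyunmin-H/Algorithm | 프로그래머스/unrated/152995. 인사고과/인사고과.py | solution
-- ===== SOURCE A (Python) =====
-- def solution(scores):
--     import copy
--     answer = 0
--     cnt_high = 0
--     if len(scores) ==1 :
--         return 1
--     yongho_score = copy.deepcopy(scores[0])
--     scores = sorted(scores[1:], key=lambda x : (-x[0], x[1]))
--
--     max_b = 0
--     for a, b in scores :
--         if a > yongho_score[0] and b > yongho_score[1] :
--             return -1
--         if b >= max_b :
--             if a+ b > yongho_score[0]+yongho_score[1]:
--                 cnt_high+=1
--             max_b = b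
--
--
--
--
--     return cnt_high+1
-- ===== SOURCE B (Python) =====
-- def solution(scores):
--     if len(scores) == 1:
--         return 1
--     y = scores[0]
--     rest = scores[1:]
--     if any(e[0] > y[0] and e[1] > y[1] for e in rest):
--         return -1
--     cnt = sum(1 for j in rest
--               if j[0] + j[1] > y[0] + y[1]
--               and not any(i[0] > j[0] and i[1] > j[1] for i in rest))
--     return cnt + 1
-- ===== Notes on version B (the rewrite author's own statement) =====
-- stated objective: simpler
-- what changed: B drops A's sort-and-sweep (sorted by (-a,b) with a running max_b) and instead does a direct double scan: return -1 if anyone strictly dominates the target, else count the non-strictly-dominated employees whose score sum beats the target's, plus 1.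
-- intended difference: On inputs where some employee below the target in rank order has a negative second score yet is undominated and has a larger sum than the target, A's max_b initialised to 0 silently drops that employee from the count, while B counts him, which is the intended Pareto-dominance answer. — e.g. on solution([[0, 0], [2, -1]]): A returns 1, B returns 2
-- outside the precondition, e.g. on solution([[5], [4, -3]]): A returns 1, B raises IndexError
import Mathlib
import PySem

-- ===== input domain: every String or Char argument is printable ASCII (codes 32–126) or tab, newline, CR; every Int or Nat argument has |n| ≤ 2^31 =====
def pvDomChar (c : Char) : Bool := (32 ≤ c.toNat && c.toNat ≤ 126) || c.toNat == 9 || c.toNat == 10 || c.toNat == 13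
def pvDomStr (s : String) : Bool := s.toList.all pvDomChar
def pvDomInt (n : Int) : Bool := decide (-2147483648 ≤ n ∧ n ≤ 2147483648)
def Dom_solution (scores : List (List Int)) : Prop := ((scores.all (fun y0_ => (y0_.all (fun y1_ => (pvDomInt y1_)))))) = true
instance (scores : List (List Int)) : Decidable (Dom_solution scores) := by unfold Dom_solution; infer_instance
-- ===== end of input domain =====

-- B replaces A's sort-then-sweep with a direct double scan (dominance + sum check); equivalence is
-- proved outside D_solution, where A's max_b = 0 initialisation silently drops undominated employees
-- with a negative second score. (Python A copies scores[0] and rebinds the local 'scores'; no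
-- caller-visible mutation.)


-- ===== PORT A =====
-- e[0] / e[1] on an employee record; Pre_solution keeps the indices in range, so the default is never
-- the value Python raises on
def pvA (e : List Int) : Int := PySem.List.pyGetD e 0 0
def pvB (e : List Int) : Int := PySem.List.pyGetD e 1 0

-- the 'for a, b in scores' sweep of A, with the early 'return -1'
def solLoopA (y0 y1 : Int) : List (List Int) → Int → Int → Int
  | [], _, cnt => cnt + 1
  | e :: rest, maxb, cnt =>
    if pvA e > y0 ∧ pvB e > y1 then -1
    else if pvB e ≥ maxb then
      solLoopA y0 y1 rest (pvB e) (if pvA e + pvB e > y0 + y1 then cnt + 1 else cnt)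
    else solLoopA y0 y1 rest maxb cnt

def solution (scores : List (List Int)) : Int :=
  if scores.length = 1 then 1
  else
    let y := PySem.List.pyGetD scores 0 []
    let s := PySem.List.sorted2 (PySem.List.slice scores (some 1) none)
               (fun x => -(pvA x)) (fun x => pvB x)
    solLoopA (pvA y) (pvB y) s 0 0

-- ===== PORT B =====
def solution_alt (scores : List (List Int)) : Int :=
  if scores.length = 1 then 1
  else
    let y := PySem.List.pyGetD scores 0 []
    let rest := PySem.List.slice scores (some 1) none
    if rest.any (fun e => decide (pvA e > pvA y) && decide (pvB e > pvB y)) then -1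
    else
      (rest.countP (fun j => decide (pvA j + pvB j > pvA y + pvB y)
          && !(rest.any (fun i => decide (pvA i > pvA j) && decide (pvB i > pvB j)))) : Int) + 1

-- ===== PRECONDITION & SPEC =====
-- Pre_ excludes the empty list and ill-shaped records (head shorter than 2, or a non-pair below the
-- head): Python A raises IndexError/ValueError there except on a few and-short-circuit accidents
-- (e.g. [[5],[4,-3]]) on which B raises IndexError.
def Pre_solution (scores : List (List Int)) : Prop :=
  scores ≠ [] ∧
    (scores.length = 1 ∨
      (2 ≤ (scores.headD []).length ∧ ∀ e ∈ scores.tail, e.length = 2))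
instance (scores : List (List Int)) : Decidable (Pre_solution scores) := by
  unfold Pre_solution; infer_instance
def pvWitness_solution : List (List Int) := [[1, 2], [3, 1]]

-- On inputs where some employee below the head has a NEGATIVE second score yet is undominated and
-- out-sums the target, A's 'max_b = 0' initialisation silently drops him from the count while B
-- counts him — B's is the intended Pareto-dominance answer.
def D_solution (scores : List (List Int)) : Prop :=
  ∃ j ∈ scores.tail, pvB j < 0 ∧
    pvA (scores.headD []) + pvB (scores.headD []) < pvA j + pvB j ∧
    ∀ i ∈ scores.tail,
      ¬(pvA j < pvA i ∧ pvB j < pvB i) ∧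
      ¬(pvA (scores.headD []) < pvA i ∧ pvB (scores.headD []) < pvB i)
instance (scores : List (List Int)) : Decidable (D_solution scores) := by
  unfold D_solution; infer_instance

def Spec_solution (scores : List (List Int)) (out : Int) : Prop :=
  ¬ D_solution scores → out = solution_alt scores
instance (scores : List (List Int)) (out : Int) : Decidable (Spec_solution scores out) := by
  unfold Spec_solution; infer_instance

def pvDiffWitness_solution : List (List Int) := [[0, 0], [2, -1]]
def pvDiffWitnessOut_solution : Int × Int := (1, 2)

-- ===== CLAIM (what is proved, stated in full; the proofs are below) =====
def Claim_unchanged_solution : Prop :=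
  ∀ (scores : List (List Int)), Dom_solution scores → Pre_solution scores →
    Spec_solution scores (solution scores)
def Claim_changed_solution : Prop :=
  Dom_solution (pvDiffWitness_solution) ∧ Pre_solution (pvDiffWitness_solution) ∧
    D_solution (pvDiffWitness_solution) ∧
    solution (pvDiffWitness_solution) = pvDiffWitnessOut_solution.1 ∧
    solution_alt (pvDiffWitness_solution) = pvDiffWitnessOut_solution.2 ∧
    pvDiffWitnessOut_solution.1 ≠ pvDiffWitnessOut_solution.2
def Claim_exact_solution : Prop :=
  ∀ (scores : List (List Int)), Dom_solution scores → Pre_solution scores →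
    D_solution scores → solution scores ≠ solution_alt scores

-- ===== LEMMAS AND PROOFS =====

-- the Boolean predicates B's count uses
def goodB (y0 y1 : Int) (j : List Int) : Bool := decide (pvA j + pvB j > y0 + y1)
def ndB (t : List (List Int)) (j : List Int) : Bool :=
  !(t.any (fun i => decide (pvA i > pvA j) && decide (pvB i > pvB j)))

-- the sort order of A: descending first score, ascending second score among equal first scores
def ordR (x z : List Int) : Prop := pvA z ≤ pvA x ∧ (pvA z < pvA x ∨ pvB x ≤ pvB z)

def befA (a b : List Int) : Bool :=
  decide ((fun v => -(pvA v)) a < (fun v => -(pvA v)) b)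
    || (!decide ((fun v => -(pvA v)) b < (fun v => -(pvA v)) a) && decide (pvB a < pvB b))

theorem befA_true_ordR (a b : List Int) (h : befA a b = true) : ordR a b := by
  simp [befA] at h; unfold ordR; omega

theorem befA_false_ordR (a b : List Int) (h : befA a b = false) : ordR b a := by
  simp [befA] at h; unfold ordR; omega

theorem ordR_trans (a b c : List Int) (h1 : ordR a b) (h2 : ordR b c) : ordR a c := by
  unfold ordR at *; omega

theorem countP_congrB {α : Type} {p q : α → Bool} {l : List α}
    (h : ∀ a ∈ l, p a = q a) : l.countP p = l.countP q :=
  List.countP_congr (fun a ha => by rw [h a ha])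

theorem insertBy_pairwise_ordR (x : List Int) (ys : List (List Int))
    (h : ys.Pairwise ordR) :
    (PySem.List.insertBy befA x ys).Pairwise ordR := by
  induction ys with
  | nil => simp [PySem.List.insertBy]
  | cons y t ih =>
    rw [List.pairwise_cons] at h
    obtain ⟨hy, ht⟩ := h
    by_cases hb : befA x y = true
    · rw [PySem.List.insertBy, if_pos hb]
      refine List.Pairwise.cons ?_ (List.Pairwise.cons hy ht)
      intro z hz
      rcases List.mem_cons.mp hz with rfl | hzt
      · exact befA_true_ordR _ _ hb
      · exact ordR_trans _ _ _ (befA_true_ordR _ _ hb) (hy z hzt)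
    · rw [PySem.List.insertBy, if_neg hb]
      refine List.Pairwise.cons ?_ (ih ht)
      intro z hz
      rcases (PySem.List.mem_insertBy _ _ _ _).mp hz with rfl | hzt
      · exact befA_false_ordR _ _ (Bool.eq_false_iff.mpr hb)
      · exact hy z hzt

theorem foldl_insertBy_pairwise (xs acc : List (List Int)) (hacc : acc.Pairwise ordR) :
    (xs.foldl (fun acc x => PySem.List.insertBy befA x acc) acc).Pairwise ordR := by
  induction xs generalizing acc with
  | nil => exact hacc
  | cons x t ih => exact ih _ (insertBy_pairwise_ordR x acc hacc)

theorem sorted2_pairwise_ordR (xs : List (List Int)) :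
    (PySem.List.sorted2 xs (fun v => -(pvA v)) (fun v => pvB v)).Pairwise ordR := by
  have h : PySem.List.sorted2 xs (fun v => -(pvA v)) (fun v => pvB v)
      = xs.foldl (fun acc x => PySem.List.insertBy befA x acc) [] := by
    unfold PySem.List.sorted2 befA
    simp
  rw [h]
  exact foldl_insertBy_pairwise xs [] (List.Pairwise.nil)

theorem loop_neg (y0 y1 : Int) (s : List (List Int)) (m cnt : Int)
    (h : ∃ e ∈ s, y0 < pvA e ∧ y1 < pvB e) :
    solLoopA y0 y1 s m cnt = -1 := by
  induction s generalizing m cnt with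
  | nil => simp at h
  | cons e rest ih =>
    obtain ⟨f, hf, hdom⟩ := h
    rcases List.mem_cons.mp hf with rfl | hfr
    · rw [solLoopA, if_pos hdom]
    · rw [solLoopA]
      split_ifs with h1 h2 <;> first | rfl | exact ih _ _ ⟨f, hfr, hdom⟩

theorem loop_count (y0 y1 : Int) (s : List (List Int)) (m cnt : Int)
    (hs : s.Pairwise ordR) (hnd : ∀ e ∈ s, ¬(y0 < pvA e ∧ y1 < pvB e)) :
    solLoopA y0 y1 s m cnt
      = cnt + (s.countP (fun j => decide (m ≤ pvB j) && goodB y0 y1 j && ndB s j) : Int) + 1 := by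
  induction s generalizing m cnt with
  | nil => simp [solLoopA]
  | cons x t ih =>
    rw [List.pairwise_cons] at hs
    obtain ⟨hx, ht⟩ := hs
    have hndt : ∀ e ∈ t, ¬(y0 < pvA e ∧ y1 < pvB e) :=
      fun e he => hnd e (List.mem_cons_of_mem _ he)
    rw [solLoopA, if_neg (hnd x (List.mem_cons_self))]
    by_cases hb : pvB x ≥ m
    · rw [if_pos hb, ih _ _ ht hndt]
      have hcong : ∀ j ∈ t,
          (decide (pvB x ≤ pvB j) && goodB y0 y1 j && ndB t j)
            = (decide (m ≤ pvB j) && goodB y0 y1 j && ndB (x :: t) j) := by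
        intro j hj
        obtain ⟨ha1, ha2⟩ := hx j hj
        simp only [ndB, List.any_cons, Bool.not_or]
        have h1 : decide (pvB x ≤ pvB j) = (decide (m ≤ pvB j)
            && !(decide (pvA j < pvA x) && decide (pvB j < pvB x))) := by
          by_cases hc : pvB x ≤ pvB j
          · simp only [decide_eq_true hc, decide_eq_true (show m ≤ pvB j by omega),
              decide_eq_false (show ¬ pvB j < pvB x by omega), Bool.and_false,
              Bool.not_false, Bool.and_true]
          · simp only [decide_eq_false hc,
              decide_eq_true (show pvA j < pvA x by omega),
              decide_eq_true (show pvB j < pvB x by omega), Bool.and_self,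
              Bool.not_true, Bool.and_false]
        rw [h1, Bool.and_assoc, Bool.and_assoc, Bool.and_assoc]
        congr 1
        rw [← Bool.and_assoc, ← Bool.and_assoc]
        congr 1
        rw [Bool.and_comm]
      rw [countP_congrB hcong, List.countP_cons]
      have hndx : ndB (x :: t) x = true := by
        simp only [ndB, Bool.not_eq_eq_eq_not, Bool.not_true, List.any_eq_false,
          Bool.and_eq_true, decide_eq_true_eq, not_and]
        intro i hi h1
        rcases List.mem_cons.mp hi with rfl | hit
        · omega
        · obtain ⟨hb1, hb2⟩ := hx i hit
          omega
      have hpx : (decide (m ≤ pvB x) && goodB y0 y1 x && ndB (x :: t) x)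
          = goodB y0 y1 x := by
        rw [hndx, decide_eq_true (show m ≤ pvB x by omega), Bool.true_and, Bool.and_true]
      rw [hpx]
      by_cases hg : pvA x + pvB x > y0 + y1
      · rw [if_pos hg, if_pos (show goodB y0 y1 x = true by simp only [goodB]; exact decide_eq_true hg)]
        push_cast; ring
      · rw [if_neg hg, if_neg (show ¬ goodB y0 y1 x = true by simp [goodB, hg])]
        push_cast; ring
    · rw [if_neg hb, ih _ _ ht hndt]
      have hcong : ∀ j ∈ t,
          (decide (m ≤ pvB j) && goodB y0 y1 j && ndB t j)
            = (decide (m ≤ pvB j) && goodB y0 y1 j && ndB (x :: t) j) := by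
        intro j hj
        simp only [ndB, List.any_cons, Bool.not_or]
        cases hc : (decide (m ≤ pvB j) : Bool)
        · simp
        · have h1 : (!(decide (pvA x > pvA j) && decide (pvB x > pvB j))) = true := by
            have hm : m ≤ pvB j := of_decide_eq_true hc
            simp only [Bool.not_eq_eq_eq_not, Bool.not_true, Bool.and_eq_false_iff,
              decide_eq_false_iff_not]
            right; omega
          rw [h1]
          simp
      rw [countP_congrB hcong, List.countP_cons]
      have hpx : (decide (m ≤ pvB x) && goodB y0 y1 x && ndB (x :: t) x) = false := by
        rw [decide_eq_false (show ¬ m ≤ pvB x by omega), Bool.false_and, Bool.false_and]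
      rw [hpx]
      simp

theorem ndB_perm (s t : List (List Int)) (h : s.Perm t) (j : List Int) :
    ndB s j = ndB t j := by
  unfold ndB
  have hiff : (s.any (fun i => decide (pvA i > pvA j) && decide (pvB i > pvB j)) = true)
      ↔ (t.any (fun i => decide (pvA i > pvA j) && decide (pvB i > pvB j)) = true) := by
    simp only [List.any_eq_true]
    exact ⟨fun ⟨i, hi, hf⟩ => ⟨i, h.mem_iff.mp hi, hf⟩,
           fun ⟨i, hi, hf⟩ => ⟨i, h.mem_iff.mpr hi, hf⟩⟩
  cases hs : s.any (fun i => decide (pvA i > pvA j) && decide (pvB i > pvB j)) <;>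
    cases ht : t.any (fun i => decide (pvA i > pvA j) && decide (pvB i > pvB j)) <;>
    simp_all

theorem countP_lt {α : Type} (p q : α → Bool) (l : List α)
    (hpq : ∀ a ∈ l, p a = true → q a = true) (a : α) (ha : a ∈ l)
    (hp : p a = false) (hq : q a = true) : l.countP p < l.countP q := by
  induction l with
  | nil => simp at ha
  | cons b t ih =>
    rw [List.countP_cons, List.countP_cons]
    rcases List.mem_cons.mp ha with rfl | hat
    · have hle := List.countP_mono_left (l := t)
        (fun x hx => hpq x (List.mem_cons_of_mem _ hx))
      rw [hp, hq]
      simp only [Bool.false_eq_true, if_false, if_true]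
      omega
    · have hlt := ih (fun x hx => hpq x (List.mem_cons_of_mem _ hx)) hat
      have hb : p b = true → q b = true := hpq b List.mem_cons_self
      cases hpb : p b
      · simp only [Bool.false_eq_true, if_false]
        omega
      · rw [hb hpb]
        simp only [if_true]
        omega

theorem pyGetD_cons0 (y : List Int) (tl : List (List Int)) :
    PySem.List.pyGetD (y :: tl) (0 : Int) [] = y := by
  simp [PySem.List.pyGetD, PySem.List.pyGet?, PySem.List.pyIdx?]

theorem slice_one_cons (y : List Int) (tl : List (List Int)) :
    PySem.List.slice (y :: tl) (some 1) none = tl := by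
  simpa using PySem.List.slice_from_one (y :: tl)

theorem solution_unfold (y : List Int) (tl : List (List Int)) (htl : tl ≠ []) :
    solution (y :: tl)
      = solLoopA (pvA y) (pvB y)
          (PySem.List.sorted2 tl (fun x => -(pvA x)) (fun x => pvB x)) 0 0 := by
  have hlen : ¬ (y :: tl).length = 1 := by
    cases tl with
    | nil => exact absurd rfl htl
    | cons a b => simp
  simp only [solution, pyGetD_cons0, slice_one_cons]
  rw [if_neg hlen]

theorem solution_alt_unfold (y : List Int) (tl : List (List Int)) (htl : tl ≠ []) :
    solution_alt (y :: tl)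
      = if tl.any (fun e => decide (pvA e > pvA y) && decide (pvB e > pvB y)) = true
          then (-1 : Int)
          else (tl.countP (fun j => goodB (pvA y) (pvB y) j && ndB tl j) : Int) + 1 := by
  have hlen : ¬ (y :: tl).length = 1 := by
    cases tl with
    | nil => exact absurd rfl htl
    | cons a b => simp
  simp only [solution_alt, pyGetD_cons0, slice_one_cons, goodB, ndB]
  rw [if_neg hlen]

theorem solution_eq_countP (y : List Int) (tl : List (List Int)) (htl : tl ≠ [])
    (hdomy : ∀ e ∈ tl, ¬(pvA y < pvA e ∧ pvB y < pvB e)) :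
    solution (y :: tl)
      = (tl.countP (fun j => decide ((0:Int) ≤ pvB j)
          && goodB (pvA y) (pvB y) j && ndB tl j) : Int) + 1 := by
  rw [solution_unfold y tl htl]
  have hperm : (PySem.List.sorted2 tl (fun x => -(pvA x)) (fun x => pvB x)).Perm tl :=
    PySem.List.sorted2_perm _ _ _ _
  have hnds : ∀ e ∈ PySem.List.sorted2 tl (fun x => -(pvA x)) (fun x => pvB x),
      ¬(pvA y < pvA e ∧ pvB y < pvB e) := fun e he => hdomy e (hperm.mem_iff.mp he)
  rw [loop_count (pvA y) (pvB y) _ 0 0 (sorted2_pairwise_ordR tl) hnds]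
  have hcong : ∀ j ∈ PySem.List.sorted2 tl (fun x => -(pvA x)) (fun x => pvB x),
      (decide ((0:Int) ≤ pvB j) && goodB (pvA y) (pvB y) j
          && ndB (PySem.List.sorted2 tl (fun x => -(pvA x)) (fun x => pvB x)) j)
        = (decide ((0:Int) ≤ pvB j) && goodB (pvA y) (pvB y) j && ndB tl j) := by
    intro j _
    rw [ndB_perm _ _ hperm]
  rw [countP_congrB hcong, hperm.countP_eq]
  ring

theorem solution_alt_eq_countP (y : List Int) (tl : List (List Int)) (htl : tl ≠ [])
    (hdomy : ∀ e ∈ tl, ¬(pvA y < pvA e ∧ pvB y < pvB e)) :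
    solution_alt (y :: tl)
      = (tl.countP (fun j => goodB (pvA y) (pvB y) j && ndB tl j) : Int) + 1 := by
  have hany : tl.any (fun e => decide (pvA e > pvA y) && decide (pvB e > pvB y)) = false := by
    rw [List.any_eq_false]
    intro e he
    simpa using hdomy e he
  rw [solution_alt_unfold y tl htl, hany]
  simp

-- ===== VERDICT (by name: the statement is the Claim_ definition above) =====
theorem solution_spec : Claim_unchanged_solution := by
  intro scores hdom hpre
  unfold Spec_solution
  intro hnD
  obtain ⟨hne, hsh⟩ := hpre
  cases scores with
  | nil => exact absurd rfl hne
  | cons y tl =>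
    by_cases htl : tl = []
    · subst htl; simp [solution, solution_alt]
    · rcases hsh with h1 | ⟨hhd, htl2⟩
      · exfalso
        apply htl
        cases tl with
        | nil => rfl
        | cons a b => simp at h1
      · by_cases hdomy : ∃ e ∈ tl, pvA y < pvA e ∧ pvB y < pvB e
        · obtain ⟨e, he, hd⟩ := hdomy
          have hperm : (PySem.List.sorted2 tl (fun x => -(pvA x)) (fun x => pvB x)).Perm tl :=
            PySem.List.sorted2_perm _ _ _ _
          rw [solution_unfold y tl htl, solution_alt_unfold y tl htl]
          rw [loop_neg _ _ _ _ _ ⟨e, hperm.mem_iff.mpr he, hd⟩]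
          have hany : tl.any (fun e => decide (pvA e > pvA y) && decide (pvB e > pvB y))
              = true := List.any_eq_true.mpr ⟨e, he, by simpa using hd⟩
          rw [hany, if_pos rfl]
        · have hdomy' : ∀ e ∈ tl, ¬(pvA y < pvA e ∧ pvB y < pvB e) :=
            fun e he hd => hdomy ⟨e, he, hd⟩
          rw [solution_eq_countP y tl htl hdomy', solution_alt_eq_countP y tl htl hdomy']
          have hcong : ∀ j ∈ tl,
              (decide ((0:Int) ≤ pvB j) && goodB (pvA y) (pvB y) j && ndB tl j)
                = (goodB (pvA y) (pvB y) j && ndB tl j) := by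
            intro j hj
            cases hg : goodB (pvA y) (pvB y) j with
            | false => simp
            | true =>
              cases hn : ndB tl j with
              | false => simp
              | true =>
                have h0 : decide ((0:Int) ≤ pvB j) = true := by
                  by_contra hc
                  have hb : pvB j < 0 := by
                    have := Bool.eq_false_iff.mpr hc
                    simpa using this
                  apply hnD
                  show D_solution (y :: tl)
                  unfold D_solution
                  simp only [List.headD_cons, List.tail_cons]
                  refine ⟨j, hj, hb, by simpa [goodB] using hg, ?_⟩
                  intro i hi
                  refine ⟨?_, hdomy' i hi⟩
                  have h2 : tl.any
                      (fun i => decide (pvA i > pvA j) && decide (pvB i > pvB j))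
                      = false := by simpa [ndB] using hn
                  have := List.any_eq_false.mp h2 i hi
                  simpa using this
                rw [h0]
                simp
          rw [countP_congrB hcong]

theorem solution_changed : Claim_changed_solution := by
  unfold Claim_changed_solution; decide

theorem solution_tight : Claim_exact_solution := by
  intro scores hdom hpre hD
  cases scores with
  | nil => unfold D_solution at hD; simp at hD
  | cons y tl =>
    unfold D_solution at hD
    simp only [List.headD_cons, List.tail_cons] at hD
    obtain ⟨j, hj, hjb, hjs, hall⟩ := hD
    have hjnd : ∀ i ∈ tl, ¬(pvA j < pvA i ∧ pvB j < pvB i) := fun i hi => (hall i hi).1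
    have hnodom : ∀ e ∈ tl, ¬(pvA y < pvA e ∧ pvB y < pvB e) := fun i hi => (hall i hi).2
    have htl : tl ≠ [] := by
      intro h; subst h; simp at hj
    rw [solution_eq_countP y tl htl hnodom, solution_alt_eq_countP y tl htl hnodom]
    have hpa : (decide ((0:Int) ≤ pvB j) && goodB (pvA y) (pvB y) j && ndB tl j) = false := by
      rw [decide_eq_false (show ¬ (0:Int) ≤ pvB j by omega), Bool.false_and, Bool.false_and]
    have hqa : (goodB (pvA y) (pvB y) j && ndB tl j) = true := by
      have hg : goodB (pvA y) (pvB y) j = true := by simp [goodB]; omega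
      have hn : ndB tl j = true := by
        simp only [ndB, Bool.not_eq_eq_eq_not, Bool.not_true, List.any_eq_false,
          Bool.and_eq_true, decide_eq_true_eq, not_and]
        intro i hi h1
        exact fun h2 => hjnd i hi ⟨h1, h2⟩
      rw [hg, hn, Bool.and_self]
    have hlt := countP_lt
      (fun j => decide ((0:Int) ≤ pvB j) && goodB (pvA y) (pvB y) j && ndB tl j)
      (fun j => goodB (pvA y) (pvB y) j && ndB tl j) tl
      (fun a _ h => by
        simp only [Bool.and_eq_true] at h ⊢
        exact ⟨h.1.2, h.2⟩) j hj hpa hqa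
    omega
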